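-- pv_equiv track=rewrite | github.com/ktmihs/CodingTest | programmers/Dev-matching/[Lv2] 행렬 테두리 회전하기.py | solution
-- ===== SOURCE A (Python) =====
-- def solution(rows, columns, queries):
--     def rotate(x1,y1,x2,y2,board):
--         x1,y1,x2,y2=x1-1,y1-1,x2-1,y2-1     # index로 변경
--         tmp,val=board[x1][y1],rows*columns  # tmp=맨 처음 옮겨지는 칸 숫자, val=min 값
--         for x in range(x1,x2): val=min(val,board[x][y1]);board[x][y1]=board[x+1][y1]    # ⬆
--         for y in range(y1,y2): val=min(val,board[x2][y]);board[x2][y]=board[x2][y+1]    # ⬅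
--         for x in range(x2,x1,-1): val=min(val,board[x][y2]);board[x][y2]=board[x-1][y2] # ⬇
--         for y in range(y2,y1,-1): val=min(val,board[x1][y]);board[x1][y]=board[x1][y-1] # ➡
--         board[x1][y1+1]=tmp # 맨 처음 값 제대로 옮기기
--         return board,val
--     board,answer=[[i*columns+j+1 for j in range(columns)]for i in range(rows)],[]
--     for query in queries:
--         board,val=rotate(*query,board)
--         answer.append(val)  # 각 회전 시의 최소값 추가
--     return answer
-- ===== SOURCE B (Python) =====
-- def solution(rows, columns, queries):
--     board = [[i * columns + j + 1 for j in range(columns)] for i in range(rows)]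
--     answer = []
--     for x1, y1, x2, y2 in queries:
--         x1 -= 1; y1 -= 1; x2 -= 1; y2 -= 1
--
--         def new_cell(i, j):
--             # each border cell receives the value of its ring successor (clockwise rotation)
--             if not (x1 <= i <= x2 and y1 <= j <= y2 and (i == x1 or i == x2 or j == y1 or j == y2)):
--                 return board[i][j]                    # not on the ring: unchanged
--             if i == x1 and j > y1:
--                 return board[i][j - 1]                # top row: value comes from the left
--             if j == y2:
--                 return board[i - 1][j]                # right column: from above
--             if i == x2:
--                 return board[i][j + 1]                # bottom row: from the right
--             return board[i + 1][j]                    # left column: from below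
--
--         ring = ([(x, y1) for x in range(x1, x2)] + [(x2, y) for y in range(y1, y2)]
--                 + [(x, y2) for x in range(x2, x1, -1)] + [(x1, y) for y in range(y2, y1, -1)])
--         answer.append(min(board[x][y] for x, y in ring))
--         board = [[new_cell(i, j) for j in range(columns)] for i in range(rows)]
--     return answer
-- ===== Notes on version B (the rewrite author's own statement) =====
-- stated objective: alternative
-- what changed: A rotates the border in place with four sequential shift loops carrying a running minimum through the mutated board; B lists the ring coordinates, takes the minimum of their values, and rebuilds the board functionally with a closed-form ring-successor map, never mutating mid-query.
-- outside the precondition, e.g. on solution(2, 2, [[1, 1, 1, 1]]): A returns [4], B raises ValueError; on solution(6, 6, [[0, 5, 3, 3], [2, 5, 2, 6]]): A returns [3, 12], B returns [3, 11]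
import Mathlib
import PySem

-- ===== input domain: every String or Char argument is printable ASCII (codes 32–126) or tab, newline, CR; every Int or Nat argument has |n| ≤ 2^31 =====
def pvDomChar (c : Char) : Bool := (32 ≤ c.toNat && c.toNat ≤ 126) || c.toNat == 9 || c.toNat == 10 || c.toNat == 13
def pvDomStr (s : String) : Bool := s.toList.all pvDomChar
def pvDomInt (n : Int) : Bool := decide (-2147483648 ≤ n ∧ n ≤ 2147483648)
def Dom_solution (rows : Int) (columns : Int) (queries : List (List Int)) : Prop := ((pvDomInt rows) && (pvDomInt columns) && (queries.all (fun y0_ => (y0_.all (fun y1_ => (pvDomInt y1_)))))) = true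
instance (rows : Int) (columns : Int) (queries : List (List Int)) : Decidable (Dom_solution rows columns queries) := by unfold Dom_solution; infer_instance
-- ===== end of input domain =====

-- B replaces A's four in-place border-shift loops by a ring-coordinate list for the minimum and a
-- functional rebuild of the board from a closed-form ring-successor map ("alternative": not faster).
-- A mutates its local board only (fresh per call); return-value equivalence is what is proved.

-- ===== PORT A =====
-- board[x][y] (both indices in range under Pre_; pyGetD/pySetD are the total forms)
def pvBGet (b : List (List Int)) (x y : Int) : Int :=
  PySem.List.pyGetD (PySem.List.pyGetD b x []) y 0

def pvBSet (b : List (List Int)) (x y : Int) (v : Int) : List (List Int) :=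
  PySem.List.pySetD b x (PySem.List.pySetD (PySem.List.pyGetD b x []) y v)

-- rotate(x1, y1, x2, y2, board): the four shift loops each carry (board, val)
def pvRotate (x1 y1 x2 y2 : Int) (board : List (List Int)) (rows columns : Int) :
    List (List Int) × Int :=
  let x1 := x1 - 1
  let y1 := y1 - 1
  let x2 := x2 - 1
  let y2 := y2 - 1
  let tmp := pvBGet board x1 y1
  let val := rows * columns
  let s := (PySem.List.pyRange x1 x2 1).foldl
    (fun (s : List (List Int) × Int) x =>
      (pvBSet s.1 x y1 (pvBGet s.1 (x + 1) y1), min s.2 (pvBGet s.1 x y1))) (board, val)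
  let s := (PySem.List.pyRange y1 y2 1).foldl
    (fun (s : List (List Int) × Int) y =>
      (pvBSet s.1 x2 y (pvBGet s.1 x2 (y + 1)), min s.2 (pvBGet s.1 x2 y))) s
  let s := (PySem.List.pyRange x2 x1 (-1)).foldl
    (fun (s : List (List Int) × Int) x =>
      (pvBSet s.1 x y2 (pvBGet s.1 (x - 1) y2), min s.2 (pvBGet s.1 x y2))) s
  let s := (PySem.List.pyRange y2 y1 (-1)).foldl
    (fun (s : List (List Int) × Int) y =>
      (pvBSet s.1 x1 y (pvBGet s.1 x1 (y - 1)), min s.2 (pvBGet s.1 x1 y))) s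
  (pvBSet s.1 x1 (y1 + 1) tmp, s.2)

def solution (rows : Int) (columns : Int) (queries : List (List Int)) : List Int :=
  let board := (PySem.List.pyRange 0 rows 1).map (fun i =>
    (PySem.List.pyRange 0 columns 1).map (fun j => i * columns + j + 1))
  (queries.foldl (fun (s : List (List Int) × List Int) query =>
      match query with
      | [a, b, c, d] =>
        let r := pvRotate a b c d s.1 rows columns
        (r.1, s.2 ++ [r.2])
      | _ => s   -- rotate(*query, board) raises TypeError unless query has 4 entries; Pre_ excludes that
    ) (board, [])).2

-- ===== PORT B =====
-- new_cell(i, j): each border cell receives the value of its ring successor, others are unchanged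
def pvNewCell (x1 y1 x2 y2 : Int) (board : List (List Int)) (i j : Int) : Int :=
  if ¬ (x1 ≤ i ∧ i ≤ x2 ∧ y1 ≤ j ∧ j ≤ y2 ∧ (i = x1 ∨ i = x2 ∨ j = y1 ∨ j = y2)) then
    PySem.List.pyGetD (PySem.List.pyGetD board i []) j 0             -- not on the ring: unchanged
  else if i = x1 ∧ y1 < j then
    PySem.List.pyGetD (PySem.List.pyGetD board i []) (j - 1) 0       -- top row: from the left
  else if j = y2 then
    PySem.List.pyGetD (PySem.List.pyGetD board (i - 1) []) j 0       -- right column: from above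
  else if i = x2 then
    PySem.List.pyGetD (PySem.List.pyGetD board i []) (j + 1) 0       -- bottom row: from the right
  else
    PySem.List.pyGetD (PySem.List.pyGetD board (i + 1) []) j 0       -- left column: from below

def solution_alt (rows : Int) (columns : Int) (queries : List (List Int)) : List Int :=
  let board := (PySem.List.pyRange 0 rows 1).map (fun i =>
    (PySem.List.pyRange 0 columns 1).map (fun j => i * columns + j + 1))
  (queries.foldl (fun (s : List (List Int) × List Int) query =>
      -- the for-loop unpacking raises unless the query has exactly 4 entries (Pre_ excludes
      -- that); the length guard only makes the port total there
      if query.length = 4 then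
        let x1 := PySem.List.pyGetD query 0 0 - 1
        let y1 := PySem.List.pyGetD query 1 0 - 1
        let x2 := PySem.List.pyGetD query 2 0 - 1
        let y2 := PySem.List.pyGetD query 3 0 - 1
          let ring := (PySem.List.pyRange x1 x2 1).map (fun x => (x, y1))
            ++ (PySem.List.pyRange y1 y2 1).map (fun y => (x2, y))
            ++ (PySem.List.pyRange x2 x1 (-1)).map (fun x => (x, y2))
            ++ (PySem.List.pyRange y2 y1 (-1)).map (fun y => (x1, y))
          let m := (PySem.List.min? (ring.map
            (fun p => PySem.List.pyGetD (PySem.List.pyGetD s.1 p.1 []) p.2 0)) (fun v => v)).getD 0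
          let board' := (PySem.List.pyRange 0 rows 1).map (fun i =>
            (PySem.List.pyRange 0 columns 1).map (fun j => pvNewCell x1 y1 x2 y2 s.1 i j))
          (board', s.2 ++ [m])
      else s
    ) (board, [])).2

-- ===== PRECONDITION & SPEC =====
-- Pre_ admits exactly the well-formed rectangle queries of the original problem statement
-- (four 1-based coordinates with x1 < x2 within rows and y1 < y2 within columns). Outside it A
-- either raises (TypeError/IndexError) or returns a value produced by Python negative-index
-- wraparound or by a degenerate single-cell query's stray write, where B raises ValueError on the
-- empty ring or rotates the wrapped rectangle differently.
def pvOkQuery (rows columns : Int) (q : List Int) : Bool :=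
  q.length == 4 &&
    (let x1 := PySem.List.pyGetD q 0 0
     let y1 := PySem.List.pyGetD q 1 0
     let x2 := PySem.List.pyGetD q 2 0
     let y2 := PySem.List.pyGetD q 3 0
     decide (1 ≤ x1 ∧ x1 < x2 ∧ x2 ≤ rows ∧ 1 ≤ y1 ∧ y1 < y2 ∧ y2 ≤ columns))

def Pre_solution (rows : Int) (columns : Int) (queries : List (List Int)) : Prop :=
  queries.all (pvOkQuery rows columns) = true

instance (rows : Int) (columns : Int) (queries : List (List Int)) : Decidable (Pre_solution rows columns queries) := by unfold Pre_solution; infer_instance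

def pvWitness_solution : Int × Int × List (List Int) := (3, 3, [[1, 1, 2, 3], [1, 2, 3, 3]])

def Spec_solution (rows : Int) (columns : Int) (queries : List (List Int)) (out : List Int) : Prop := out = solution_alt rows columns queries
instance (rows : Int) (columns : Int) (queries : List (List Int)) (out : List Int) : Decidable (Spec_solution rows columns queries out) := by unfold Spec_solution; infer_instance

-- ===== CLAIM (what is proved, stated in full; the proofs are below) =====
def Claim_equal_solution : Prop := ∀ (rows : Int) (columns : Int) (queries : List (List Int)), Dom_solution rows columns queries → Pre_solution rows columns queries → Spec_solution rows columns queries (solution rows columns queries)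

-- ===== LEMMAS AND PROOFS =====
lemma pv_bget_def (b : List (List Int)) (x y : Int) :
    PySem.List.pyGetD (PySem.List.pyGetD b x []) y 0 = pvBGet b x y := rfl

def pvShape (rows columns : Int) (b : List (List Int)) : Prop :=
  b.length = rows.toNat ∧ ∀ r ∈ b, r.length = columns.toNat

def pvBound (M : Int) (b : List (List Int)) : Prop :=
  ∀ r ∈ b, ∀ v ∈ r, v ≤ M

lemma pv_row_len (rows columns : Int) (b : List (List Int)) (hS : pvShape rows columns b)
    (x : Int) (hx0 : 0 ≤ x) (hxr : x < rows) :
    (PySem.List.pyGetD b x []).length = columns.toNat := by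
  obtain ⟨hlen, hrows⟩ := hS
  rw [PySem.List.pyGetD_eq_getElem b [] hx0 (by rw [hlen]; omega)]
  exact hrows _ (List.getElem_mem (by omega))

lemma pv_row_mem (rows columns : Int) (b : List (List Int)) (hS : pvShape rows columns b)
    (x : Int) (hx0 : 0 ≤ x) (hxr : x < rows) :
    PySem.List.pyGetD b x [] ∈ b := by
  obtain ⟨hlen, hrows⟩ := hS
  rw [PySem.List.pyGetD_eq_getElem b [] hx0 (by rw [hlen]; omega)]
  exact List.getElem_mem (by omega)

lemma pv_bget_bset (rows columns : Int) (b : List (List Int)) (hS : pvShape rows columns b)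
    (x y x' y' v : Int) (hx0 : 0 ≤ x) (hxr : x < rows) (hy0 : 0 ≤ y) (hyc : y < columns)
    (hx'0 : 0 ≤ x') (hx'r : x' < rows) (hy'0 : 0 ≤ y') (hy'c : y' < columns) :
    pvBGet (pvBSet b x y v) x' y' = if x' = x ∧ y' = y then v else pvBGet b x' y' := by
  have hrl := pv_row_len rows columns b hS x hx0 hxr
  obtain ⟨hlen, hrows⟩ := hS
  have hx : x = ((x.toNat : Nat) : Int) := by omega
  have hy : y = ((y.toNat : Nat) : Int) := by omega
  have hx' : x' = ((x'.toNat : Nat) : Int) := by omega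
  have hy' : y' = ((y'.toNat : Nat) : Int) := by omega
  unfold pvBGet pvBSet
  rw [hx] at hrl
  rw [hx, hy, hx', hy']
  rw [PySem.List.pyGetD_pySetD_natCast _ _ _ _ _ (by omega)]
  by_cases hxx : x'.toNat = x.toNat
  · rw [if_pos hxx]
    rw [PySem.List.pyGetD_pySetD_natCast _ _ _ _ _ (by omega)]
    by_cases hyy : y'.toNat = y.toNat
    · rw [if_pos hyy, if_pos ⟨by omega, by omega⟩]
    · rw [if_neg hyy, if_neg (by omega), hxx]
  · rw [if_neg hxx, if_neg (by omega)]

lemma pv_shape_bset (rows columns : Int) (b : List (List Int)) (hS : pvShape rows columns b)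
    (x y v : Int) (hx0 : 0 ≤ x) (hxr : x < rows) :
    pvShape rows columns (pvBSet b x y v) := by
  have hrl := pv_row_len rows columns b hS x hx0 hxr
  obtain ⟨hlen, hrows⟩ := hS
  unfold pvBSet
  rw [PySem.List.pySetD_of_nonneg _ _ hx0]
  constructor
  · rw [List.length_set]; exact hlen
  · intro r hr
    rcases List.mem_or_eq_of_mem_set hr with h | h
    · exact hrows _ h
    · rw [h, PySem.List.length_pySetD]; exact hrl

lemma pv_bound_bget (rows columns M : Int) (b : List (List Int)) (hS : pvShape rows columns b)
    (hB : pvBound M b) (x y : Int) (hx0 : 0 ≤ x) (hxr : x < rows) (hy0 : 0 ≤ y) (hyc : y < columns) :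
    pvBGet b x y ≤ M := by
  have hrl := pv_row_len rows columns b hS x hx0 hxr
  have hrm := pv_row_mem rows columns b hS x hx0 hxr
  unfold pvBGet
  refine hB _ hrm _ ?_
  rw [PySem.List.pyGetD_eq_getElem _ 0 hy0 (by rw [hrl]; omega)]
  exact List.getElem_mem (by omega)

lemma pv_bget_natCast (b : List (List Int)) (i j : Nat) (hi : i < b.length)
    (hj : j < (b[i]'hi).length) :
    pvBGet b (i : Int) (j : Int) = (b[i]'hi)[j]'hj := by
  unfold pvBGet
  rw [PySem.List.pyGetD_natCast b i, List.getD_eq_getElem b [] hi,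
      PySem.List.pyGetD_natCast _ j, List.getD_eq_getElem _ 0 hj]

lemma pv_eq_of_bget (rows columns : Int) (b1 b2 : List (List Int))
    (h1 : pvShape rows columns b1) (h2 : pvShape rows columns b2)
    (h : ∀ x y : Int, 0 ≤ x → x < rows → 0 ≤ y → y < columns → pvBGet b1 x y = pvBGet b2 x y) :
    b1 = b2 := by
  obtain ⟨hlen1, hrows1⟩ := h1
  obtain ⟨hlen2, hrows2⟩ := h2
  apply List.ext_getElem (by omega)
  intro i hi1 hi2
  have hri1 := hrows1 _ (List.getElem_mem hi1)
  have hri2 := hrows2 _ (List.getElem_mem hi2)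
  apply List.ext_getElem (by omega)
  intro j hj1 hj2
  rw [← pv_bget_natCast b1 i j hi1 hj1, ← pv_bget_natCast b2 i j hi2 hj2]
  exact h i j (by omega) (by omega) (by omega) (by omega)

lemma pv_loop1 (rows columns y1 x2 : Int) (hy0 : 0 ≤ y1) (hyc : y1 < columns) (hxr : x2 < rows) :
    ∀ (n : Nat) (a : Int) (s : List (List Int) × Int),
      (x2 - a).toNat = n → 0 ≤ a → pvShape rows columns s.1 →
      pvShape rows columns (((PySem.List.pyRange a x2 1).foldl
          (fun (s : List (List Int) × Int) x =>
            (pvBSet s.1 x y1 (pvBGet s.1 (x + 1) y1), min s.2 (pvBGet s.1 x y1))) s).1) ∧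
      (((PySem.List.pyRange a x2 1).foldl
          (fun (s : List (List Int) × Int) x =>
            (pvBSet s.1 x y1 (pvBGet s.1 (x + 1) y1), min s.2 (pvBGet s.1 x y1))) s).2
        = ((PySem.List.pyRange a x2 1).map (fun x => pvBGet s.1 x y1)).foldl min s.2) ∧
      (∀ x' y' : Int, 0 ≤ x' → x' < rows → 0 ≤ y' → y' < columns →
        pvBGet (((PySem.List.pyRange a x2 1).foldl
          (fun (s : List (List Int) × Int) x =>
            (pvBSet s.1 x y1 (pvBGet s.1 (x + 1) y1), min s.2 (pvBGet s.1 x y1))) s).1) x' y'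
          = if y' = y1 ∧ a ≤ x' ∧ x' < x2 then pvBGet s.1 (x' + 1) y1 else pvBGet s.1 x' y') := by
  intro n
  induction n with
  | zero =>
    intro a s hn ha hS
    rw [PySem.List.pyRange_one_eq_nil (by omega)]
    simp only [List.foldl_nil, List.map_nil]
    refine ⟨hS, by simp, ?_⟩
    intro x' y' _ _ _ _
    rw [if_neg (by omega)]
  | succ n ih =>
    intro a s hn ha hS
    have hax : a < x2 := by omega
    rw [PySem.List.pyRange_one_cons hax]
    simp only [List.foldl_cons, List.map_cons]
    set s' : List (List Int) × Int :=
      (pvBSet s.1 a y1 (pvBGet s.1 (a + 1) y1), min s.2 (pvBGet s.1 a y1)) with hs'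
    have hS' : pvShape rows columns s'.1 :=
      pv_shape_bset rows columns s.1 hS a y1 _ ha (by omega)
    obtain ⟨S, V, P⟩ := ih (a + 1) s' (by omega) (by omega) hS'
    have hb' : ∀ z w : Int, 0 ≤ z → z < rows → 0 ≤ w → w < columns →
        pvBGet s'.1 z w = if z = a ∧ w = y1 then pvBGet s.1 (a + 1) y1 else pvBGet s.1 z w := by
      intro z w hz hzr hw hwc
      exact pv_bget_bset rows columns s.1 hS a y1 z w _ ha (by omega) hy0 hyc hz hzr hw hwc
    refine ⟨S, ?_, ?_⟩
    · rw [V]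
      have hmc : (PySem.List.pyRange (a + 1) x2 1).map (fun x => pvBGet s'.1 x y1)
          = (PySem.List.pyRange (a + 1) x2 1).map (fun x => pvBGet s.1 x y1) := by
        apply List.map_congr_left
        intro x hx
        rw [PySem.List.mem_pyRange_one] at hx
        rw [hb' x y1 (by omega) (by omega) hy0 hyc, if_neg (by omega)]
      rw [hmc, hs']
    · intro x' y' hx'0 hx'r hy'0 hy'c
      rw [P x' y' hx'0 hx'r hy'0 hy'c]
      by_cases h1 : y' = y1 ∧ a + 1 ≤ x' ∧ x' < x2
      · rw [if_pos h1, hb' (x' + 1) y1 (by omega) (by omega) hy0 hyc, if_neg (by omega),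
            if_pos ⟨h1.1, by omega, h1.2.2⟩]
      · rw [if_neg h1, hb' x' y' hx'0 hx'r hy'0 hy'c]
        by_cases h2 : x' = a ∧ y' = y1
        · rw [if_pos h2, if_pos ⟨h2.2, by omega, by omega⟩, h2.1]
        · rw [if_neg h2, if_neg (by omega)]

lemma pv_loop2 (rows columns x2 y2 : Int) (hx0 : 0 ≤ x2) (hxr : x2 < rows) (hyc : y2 < columns) :
    ∀ (n : Nat) (a : Int) (s : List (List Int) × Int),
      (y2 - a).toNat = n → 0 ≤ a → pvShape rows columns s.1 →
      pvShape rows columns (((PySem.List.pyRange a y2 1).foldl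
          (fun (s : List (List Int) × Int) y =>
            (pvBSet s.1 x2 y (pvBGet s.1 x2 (y + 1)), min s.2 (pvBGet s.1 x2 y))) s).1) ∧
      (((PySem.List.pyRange a y2 1).foldl
          (fun (s : List (List Int) × Int) y =>
            (pvBSet s.1 x2 y (pvBGet s.1 x2 (y + 1)), min s.2 (pvBGet s.1 x2 y))) s).2
        = ((PySem.List.pyRange a y2 1).map (fun y => pvBGet s.1 x2 y)).foldl min s.2) ∧
      (∀ x' y' : Int, 0 ≤ x' → x' < rows → 0 ≤ y' → y' < columns →
        pvBGet (((PySem.List.pyRange a y2 1).foldl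
          (fun (s : List (List Int) × Int) y =>
            (pvBSet s.1 x2 y (pvBGet s.1 x2 (y + 1)), min s.2 (pvBGet s.1 x2 y))) s).1) x' y'
          = if x' = x2 ∧ a ≤ y' ∧ y' < y2 then pvBGet s.1 x2 (y' + 1) else pvBGet s.1 x' y') := by
  intro n
  induction n with
  | zero =>
    intro a s hn ha hS
    rw [PySem.List.pyRange_one_eq_nil (by omega)]
    simp only [List.foldl_nil, List.map_nil]
    refine ⟨hS, by simp, ?_⟩
    intro x' y' _ _ _ _
    rw [if_neg (by omega)]
  | succ n ih =>
    intro a s hn ha hS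
    have hay : a < y2 := by omega
    rw [PySem.List.pyRange_one_cons hay]
    simp only [List.foldl_cons, List.map_cons]
    set s' : List (List Int) × Int :=
      (pvBSet s.1 x2 a (pvBGet s.1 x2 (a + 1)), min s.2 (pvBGet s.1 x2 a)) with hs'
    have hS' : pvShape rows columns s'.1 :=
      pv_shape_bset rows columns s.1 hS x2 a _ hx0 hxr
    obtain ⟨S, V, P⟩ := ih (a + 1) s' (by omega) (by omega) hS'
    have hb' : ∀ z w : Int, 0 ≤ z → z < rows → 0 ≤ w → w < columns →
        pvBGet s'.1 z w = if z = x2 ∧ w = a then pvBGet s.1 x2 (a + 1) else pvBGet s.1 z w := by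
      intro z w hz hzr hw hwc
      exact pv_bget_bset rows columns s.1 hS x2 a z w _ hx0 hxr ha (by omega) hz hzr hw hwc
    refine ⟨S, ?_, ?_⟩
    · rw [V]
      have hmc : (PySem.List.pyRange (a + 1) y2 1).map (fun y => pvBGet s'.1 x2 y)
          = (PySem.List.pyRange (a + 1) y2 1).map (fun y => pvBGet s.1 x2 y) := by
        apply List.map_congr_left
        intro y hy
        rw [PySem.List.mem_pyRange_one] at hy
        rw [hb' x2 y hx0 hxr (by omega) (by omega), if_neg (by omega)]
      rw [hmc, hs']
    · intro x' y' hx'0 hx'r hy'0 hy'c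
      rw [P x' y' hx'0 hx'r hy'0 hy'c]
      by_cases h1 : x' = x2 ∧ a + 1 ≤ y' ∧ y' < y2
      · rw [if_pos h1, hb' x2 (y' + 1) hx0 hxr (by omega) (by omega), if_neg (by omega),
            if_pos ⟨h1.1, by omega, h1.2.2⟩]
      · rw [if_neg h1, hb' x' y' hx'0 hx'r hy'0 hy'c]
        by_cases h2 : x' = x2 ∧ y' = a
        · rw [if_pos h2, if_pos ⟨h2.1, by omega, by omega⟩, h2.2]
        · rw [if_neg h2, if_neg (by omega)]

lemma pv_loop3 (rows columns x1 y2 : Int) (hx0 : 0 ≤ x1) (hy0 : 0 ≤ y2) (hyc : y2 < columns) :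
    ∀ (n : Nat) (a : Int) (s : List (List Int) × Int),
      (a - x1).toNat = n → a < rows → pvShape rows columns s.1 →
      pvShape rows columns (((PySem.List.pyRange a x1 (-1)).foldl
          (fun (s : List (List Int) × Int) x =>
            (pvBSet s.1 x y2 (pvBGet s.1 (x - 1) y2), min s.2 (pvBGet s.1 x y2))) s).1) ∧
      (((PySem.List.pyRange a x1 (-1)).foldl
          (fun (s : List (List Int) × Int) x =>
            (pvBSet s.1 x y2 (pvBGet s.1 (x - 1) y2), min s.2 (pvBGet s.1 x y2))) s).2
        = ((PySem.List.pyRange a x1 (-1)).map (fun x => pvBGet s.1 x y2)).foldl min s.2) ∧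
      (∀ x' y' : Int, 0 ≤ x' → x' < rows → 0 ≤ y' → y' < columns →
        pvBGet (((PySem.List.pyRange a x1 (-1)).foldl
          (fun (s : List (List Int) × Int) x =>
            (pvBSet s.1 x y2 (pvBGet s.1 (x - 1) y2), min s.2 (pvBGet s.1 x y2))) s).1) x' y'
          = if y' = y2 ∧ x1 < x' ∧ x' ≤ a then pvBGet s.1 (x' - 1) y2 else pvBGet s.1 x' y') := by
  intro n
  induction n with
  | zero =>
    intro a s hn ha hS
    rw [PySem.List.pyRange_neg_one_eq_nil (by omega)]
    simp only [List.foldl_nil, List.map_nil]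
    refine ⟨hS, by simp, ?_⟩
    intro x' y' _ _ _ _
    rw [if_neg (by omega)]
  | succ n ih =>
    intro a s hn ha hS
    have hax : x1 < a := by omega
    rw [PySem.List.pyRange_neg_one_cons hax]
    simp only [List.foldl_cons, List.map_cons]
    set s' : List (List Int) × Int :=
      (pvBSet s.1 a y2 (pvBGet s.1 (a - 1) y2), min s.2 (pvBGet s.1 a y2)) with hs'
    have hS' : pvShape rows columns s'.1 :=
      pv_shape_bset rows columns s.1 hS a y2 _ (by omega) ha
    obtain ⟨S, V, P⟩ := ih (a - 1) s' (by omega) (by omega) hS'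
    have hb' : ∀ z w : Int, 0 ≤ z → z < rows → 0 ≤ w → w < columns →
        pvBGet s'.1 z w = if z = a ∧ w = y2 then pvBGet s.1 (a - 1) y2 else pvBGet s.1 z w := by
      intro z w hz hzr hw hwc
      exact pv_bget_bset rows columns s.1 hS a y2 z w _ (by omega) ha hy0 hyc hz hzr hw hwc
    refine ⟨S, ?_, ?_⟩
    · rw [V]
      have hmc : (PySem.List.pyRange (a - 1) x1 (-1)).map (fun x => pvBGet s'.1 x y2)
          = (PySem.List.pyRange (a - 1) x1 (-1)).map (fun x => pvBGet s.1 x y2) := by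
        apply List.map_congr_left
        intro x hx
        rw [PySem.List.mem_pyRange_neg_one] at hx
        rw [hb' x y2 (by omega) (by omega) hy0 hyc, if_neg (by omega)]
      rw [hmc, hs']
    · intro x' y' hx'0 hx'r hy'0 hy'c
      rw [P x' y' hx'0 hx'r hy'0 hy'c]
      by_cases h1 : y' = y2 ∧ x1 < x' ∧ x' ≤ a - 1
      · rw [if_pos h1, hb' (x' - 1) y2 (by omega) (by omega) hy0 hyc, if_neg (by omega),
            if_pos ⟨h1.1, h1.2.1, by omega⟩]
      · rw [if_neg h1, hb' x' y' hx'0 hx'r hy'0 hy'c]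
        by_cases h2 : x' = a ∧ y' = y2
        · rw [if_pos h2, if_pos ⟨h2.2, by omega, by omega⟩, h2.1]
        · rw [if_neg h2, if_neg (by omega)]

lemma pv_loop4 (rows columns x1 y1 : Int) (hx0 : 0 ≤ x1) (hxr : x1 < rows) (hy0 : 0 ≤ y1) :
    ∀ (n : Nat) (a : Int) (s : List (List Int) × Int),
      (a - y1).toNat = n → a < columns → pvShape rows columns s.1 →
      pvShape rows columns (((PySem.List.pyRange a y1 (-1)).foldl
          (fun (s : List (List Int) × Int) y =>
            (pvBSet s.1 x1 y (pvBGet s.1 x1 (y - 1)), min s.2 (pvBGet s.1 x1 y))) s).1) ∧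
      (((PySem.List.pyRange a y1 (-1)).foldl
          (fun (s : List (List Int) × Int) y =>
            (pvBSet s.1 x1 y (pvBGet s.1 x1 (y - 1)), min s.2 (pvBGet s.1 x1 y))) s).2
        = ((PySem.List.pyRange a y1 (-1)).map (fun y => pvBGet s.1 x1 y)).foldl min s.2) ∧
      (∀ x' y' : Int, 0 ≤ x' → x' < rows → 0 ≤ y' → y' < columns →
        pvBGet (((PySem.List.pyRange a y1 (-1)).foldl
          (fun (s : List (List Int) × Int) y =>
            (pvBSet s.1 x1 y (pvBGet s.1 x1 (y - 1)), min s.2 (pvBGet s.1 x1 y))) s).1) x' y'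
          = if x' = x1 ∧ y1 < y' ∧ y' ≤ a then pvBGet s.1 x1 (y' - 1) else pvBGet s.1 x' y') := by
  intro n
  induction n with
  | zero =>
    intro a s hn ha hS
    rw [PySem.List.pyRange_neg_one_eq_nil (by omega)]
    simp only [List.foldl_nil, List.map_nil]
    refine ⟨hS, by simp, ?_⟩
    intro x' y' _ _ _ _
    rw [if_neg (by omega)]
  | succ n ih =>
    intro a s hn ha hS
    have hay : y1 < a := by omega
    rw [PySem.List.pyRange_neg_one_cons hay]
    simp only [List.foldl_cons, List.map_cons]
    set s' : List (List Int) × Int :=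
      (pvBSet s.1 x1 a (pvBGet s.1 x1 (a - 1)), min s.2 (pvBGet s.1 x1 a)) with hs'
    have hS' : pvShape rows columns s'.1 :=
      pv_shape_bset rows columns s.1 hS x1 a _ hx0 hxr
    obtain ⟨S, V, P⟩ := ih (a - 1) s' (by omega) (by omega) hS'
    have hb' : ∀ z w : Int, 0 ≤ z → z < rows → 0 ≤ w → w < columns →
        pvBGet s'.1 z w = if z = x1 ∧ w = a then pvBGet s.1 x1 (a - 1) else pvBGet s.1 z w := by
      intro z w hz hzr hw hwc
      exact pv_bget_bset rows columns s.1 hS x1 a z w _ hx0 hxr (by omega) ha hz hzr hw hwc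
    refine ⟨S, ?_, ?_⟩
    · rw [V]
      have hmc : (PySem.List.pyRange (a - 1) y1 (-1)).map (fun y => pvBGet s'.1 x1 y)
          = (PySem.List.pyRange (a - 1) y1 (-1)).map (fun y => pvBGet s.1 x1 y) := by
        apply List.map_congr_left
        intro y hy
        rw [PySem.List.mem_pyRange_neg_one] at hy
        rw [hb' x1 y hx0 hxr (by omega) (by omega), if_neg (by omega)]
      rw [hmc, hs']
    · intro x' y' hx'0 hx'r hy'0 hy'c
      rw [P x' y' hx'0 hx'r hy'0 hy'c]
      by_cases h1 : x' = x1 ∧ y1 < y' ∧ y' ≤ a - 1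
      · rw [if_pos h1, hb' x1 (y' - 1) hx0 hxr (by omega) (by omega), if_neg (by omega),
            if_pos ⟨h1.1, h1.2.1, by omega⟩]
      · rw [if_neg h1, hb' x' y' hx'0 hx'r hy'0 hy'c]
        by_cases h2 : x' = x1 ∧ y' = a
        · rw [if_pos h2, if_pos ⟨h2.1, by omega, by omega⟩, h2.2]
        · rw [if_neg h2, if_neg (by omega)]

lemma pv_bget_congr (b : List (List Int)) {e1 f1 e2 f2 : Int} (h1 : e1 = f1) (h2 : e2 = f2) :
    pvBGet b e1 e2 = pvBGet b f1 f2 := by rw [h1, h2]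

lemma pv_rotate_spec (rows columns x1 y1 x2 y2 : Int) (b : List (List Int))
    (hS : pvShape rows columns b)
    (h1 : 1 ≤ x1) (h2 : x1 < x2) (h3 : x2 ≤ rows) (h4 : 1 ≤ y1) (h5 : y1 < y2) (h6 : y2 ≤ columns) :
    pvShape rows columns (pvRotate x1 y1 x2 y2 b rows columns).1 ∧
    (∀ x' y' : Int, 0 ≤ x' → x' < rows → 0 ≤ y' → y' < columns →
      pvBGet (pvRotate x1 y1 x2 y2 b rows columns).1 x' y'
        = pvNewCell (x1 - 1) (y1 - 1) (x2 - 1) (y2 - 1) b x' y') ∧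
    (pvRotate x1 y1 x2 y2 b rows columns).2
      = (((PySem.List.pyRange (x1 - 1) (x2 - 1) 1).map (fun x => (x, y1 - 1))
          ++ (PySem.List.pyRange (y1 - 1) (y2 - 1) 1).map (fun y => (x2 - 1, y))
          ++ (PySem.List.pyRange (x2 - 1) (x1 - 1) (-1)).map (fun x => (x, y2 - 1))
          ++ (PySem.List.pyRange (y2 - 1) (y1 - 1) (-1)).map (fun y => (x1 - 1, y))).map
            (fun p => pvBGet b p.1 p.2)).foldl min (rows * columns) := by
  simp only [pvRotate]
  set s1 : List (List Int) × Int := (PySem.List.pyRange (x1 - 1) (x2 - 1) 1).foldl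
      (fun (s : List (List Int) × Int) x =>
        (pvBSet s.1 x (y1 - 1) (pvBGet s.1 (x + 1) (y1 - 1)), min s.2 (pvBGet s.1 x (y1 - 1))))
      (b, rows * columns) with hs1
  set s2 : List (List Int) × Int := (PySem.List.pyRange (y1 - 1) (y2 - 1) 1).foldl
      (fun (s : List (List Int) × Int) y =>
        (pvBSet s.1 (x2 - 1) y (pvBGet s.1 (x2 - 1) (y + 1)), min s.2 (pvBGet s.1 (x2 - 1) y))) s1 with hs2
  set s3 : List (List Int) × Int := (PySem.List.pyRange (x2 - 1) (x1 - 1) (-1)).foldl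
      (fun (s : List (List Int) × Int) x =>
        (pvBSet s.1 x (y2 - 1) (pvBGet s.1 (x - 1) (y2 - 1)), min s.2 (pvBGet s.1 x (y2 - 1)))) s2 with hs3
  set s4 : List (List Int) × Int := (PySem.List.pyRange (y2 - 1) (y1 - 1) (-1)).foldl
      (fun (s : List (List Int) × Int) y =>
        (pvBSet s.1 (x1 - 1) y (pvBGet s.1 (x1 - 1) (y - 1)), min s.2 (pvBGet s.1 (x1 - 1) y))) s3 with hs4
  obtain ⟨S1, V1, P1⟩ := pv_loop1 rows columns (y1 - 1) (x2 - 1) (by omega) (by omega) (by omega)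
    ((x2 - 1) - (x1 - 1)).toNat (x1 - 1) (b, rows * columns) rfl (by omega) hS
  rw [← hs1] at S1 V1 P1
  obtain ⟨S2, V2, P2⟩ := pv_loop2 rows columns (x2 - 1) (y2 - 1) (by omega) (by omega) (by omega)
    ((y2 - 1) - (y1 - 1)).toNat (y1 - 1) s1 rfl (by omega) S1
  rw [← hs2] at S2 V2 P2
  obtain ⟨S3, V3, P3⟩ := pv_loop3 rows columns (x1 - 1) (y2 - 1) (by omega) (by omega) (by omega)
    ((x2 - 1) - (x1 - 1)).toNat (x2 - 1) s2 rfl (by omega) S2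
  rw [← hs3] at S3 V3 P3
  obtain ⟨S4, V4, P4⟩ := pv_loop4 rows columns (x1 - 1) (y1 - 1) (by omega) (by omega) (by omega)
    ((y2 - 1) - (y1 - 1)).toNat (y2 - 1) s3 rfl (by omega) S3
  rw [← hs4] at S4 V4 P4
  refine ⟨pv_shape_bset rows columns s4.1 S4 _ _ _ (by omega) (by omega), ?_, ?_⟩
  · -- pointwise characterisation
    intro x' y' hx'0 hx'r hy'0 hy'c
    rw [pv_bget_bset rows columns s4.1 S4 (x1 - 1) (y1 - 1 + 1) x' y' _
          (by omega) (by omega) (by omega) (by omega) hx'0 hx'r hy'0 hy'c]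
    unfold pvNewCell
    simp only [pv_bget_def]
    by_cases cT : x' = x1 - 1 ∧ y' = y1 - 1 + 1
    · rw [if_pos cT, if_neg (by omega), if_pos (by omega)]
      exact pv_bget_congr b (by omega) (by omega)
    · rw [if_neg cT, P4 x' y' hx'0 hx'r hy'0 hy'c]
      by_cases c4 : x' = x1 - 1 ∧ y1 - 1 < y' ∧ y' ≤ y2 - 1
      · rw [if_pos c4, P3 (x1 - 1) (y' - 1) (by omega) (by omega) (by omega) (by omega),
            if_neg (by omega), P2 (x1 - 1) (y' - 1) (by omega) (by omega) (by omega) (by omega),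
            if_neg (by omega), P1 (x1 - 1) (y' - 1) (by omega) (by omega) (by omega) (by omega),
            if_neg (by omega), if_neg (by omega), if_pos (by omega)]
        exact pv_bget_congr b (by omega) (by omega)
      · rw [if_neg c4, P3 x' y' hx'0 hx'r hy'0 hy'c]
        by_cases c3 : y' = y2 - 1 ∧ x1 - 1 < x' ∧ x' ≤ x2 - 1
        · rw [if_pos c3, P2 (x' - 1) (y2 - 1) (by omega) (by omega) (by omega) (by omega),
              if_neg (by omega), P1 (x' - 1) (y2 - 1) (by omega) (by omega) (by omega) (by omega),
              if_neg (by omega), if_neg (by omega), if_neg (by omega), if_pos (by omega)]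
          exact pv_bget_congr b (by omega) (by omega)
        · rw [if_neg c3, P2 x' y' hx'0 hx'r hy'0 hy'c]
          by_cases c2 : x' = x2 - 1 ∧ y1 - 1 ≤ y' ∧ y' < y2 - 1
          · rw [if_pos c2, P1 (x2 - 1) (y' + 1) (by omega) (by omega) (by omega) (by omega),
                if_neg (by omega), if_neg (by omega), if_neg (by omega), if_neg (by omega),
                if_pos (by omega)]
            exact pv_bget_congr b (by omega) (by omega)
          · rw [if_neg c2, P1 x' y' hx'0 hx'r hy'0 hy'c]
            by_cases c1 : y' = y1 - 1 ∧ x1 - 1 ≤ x' ∧ x' < x2 - 1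
            · rw [if_pos c1, if_neg (by omega), if_neg (by omega), if_neg (by omega),
                  if_neg (by omega)]
              exact pv_bget_congr b (by omega) (by omega)
            · rw [if_neg c1, if_pos (by omega)]
  · -- the running minimum
    rw [V4]
    have m4 : (PySem.List.pyRange (y2 - 1) (y1 - 1) (-1)).map (fun y => pvBGet s3.1 (x1 - 1) y)
        = (PySem.List.pyRange (y2 - 1) (y1 - 1) (-1)).map (fun y => pvBGet b (x1 - 1) y) := by
      apply List.map_congr_left
      intro y hy
      rw [PySem.List.mem_pyRange_neg_one] at hy
      rw [P3 (x1 - 1) y (by omega) (by omega) (by omega) (by omega), if_neg (by omega),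
          P2 (x1 - 1) y (by omega) (by omega) (by omega) (by omega), if_neg (by omega),
          P1 (x1 - 1) y (by omega) (by omega) (by omega) (by omega), if_neg (by omega)]
    rw [m4, V3]
    have m3 : (PySem.List.pyRange (x2 - 1) (x1 - 1) (-1)).map (fun x => pvBGet s2.1 x (y2 - 1))
        = (PySem.List.pyRange (x2 - 1) (x1 - 1) (-1)).map (fun x => pvBGet b x (y2 - 1)) := by
      apply List.map_congr_left
      intro x hx
      rw [PySem.List.mem_pyRange_neg_one] at hx
      rw [P2 x (y2 - 1) (by omega) (by omega) (by omega) (by omega), if_neg (by omega),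
          P1 x (y2 - 1) (by omega) (by omega) (by omega) (by omega), if_neg (by omega)]
    rw [m3, V2]
    have m2 : (PySem.List.pyRange (y1 - 1) (y2 - 1) 1).map (fun y => pvBGet s1.1 (x2 - 1) y)
        = (PySem.List.pyRange (y1 - 1) (y2 - 1) 1).map (fun y => pvBGet b (x2 - 1) y) := by
      apply List.map_congr_left
      intro y hy
      rw [PySem.List.mem_pyRange_one] at hy
      rw [P1 (x2 - 1) y (by omega) (by omega) (by omega) (by omega), if_neg (by omega)]
    rw [m2, V1]
    simp only [List.map_append, List.foldl_append, List.map_map, Function.comp_def]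

lemma pv_foldl_min_pull (t : List Int) : ∀ (M a : Int), t.foldl min (min M a) = min M (t.foldl min a) := by
  induction t with
  | nil => intro M a; simp
  | cons y t ih =>
    intro M a
    simp only [List.foldl_cons]
    rw [min_assoc, ih]

lemma pv_min_eq (M : Int) (vals : List Int) (hne : vals ≠ []) (hle : ∀ v ∈ vals, v ≤ M) :
    (PySem.List.min? vals (fun v => v)).getD 0 = vals.foldl min M := by
  match vals with
  | [] => exact absurd rfl hne
  | x :: t =>
    rw [PySem.List.min?_id_cons, Option.getD_some, List.foldl_cons]
    rw [pv_foldl_min_pull]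
    have hx : x ≤ M := hle x (List.mem_cons_self)
    have hfx := (PySem.List.foldl_min_le t x).1
    omega

lemma pv_alt_board (rows columns x1 y1 x2 y2 : Int) (b : List (List Int)) :
    pvShape rows columns ((PySem.List.pyRange 0 rows 1).map (fun i =>
      (PySem.List.pyRange 0 columns 1).map (fun j => pvNewCell x1 y1 x2 y2 b i j))) ∧
    (∀ x y : Int, 0 ≤ x → x < rows → 0 ≤ y → y < columns →
      pvBGet ((PySem.List.pyRange 0 rows 1).map (fun i =>
        (PySem.List.pyRange 0 columns 1).map (fun j => pvNewCell x1 y1 x2 y2 b i j))) x y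
        = pvNewCell x1 y1 x2 y2 b x y) := by
  constructor
  · constructor
    · rw [List.length_map, PySem.List.length_pyRange_one]; omega
    · intro r hr
      rw [List.mem_map] at hr
      obtain ⟨i, _, hi⟩ := hr
      rw [← hi, List.length_map, PySem.List.length_pyRange_one]; omega
  · intro x y hx0 hxr hy0 hyc
    unfold pvBGet
    rw [PySem.List.pyGetD_map_pyRange_of_nonneg _ rows x [] hx0 hxr,
        PySem.List.pyGetD_map_pyRange_of_nonneg _ columns y 0 hy0 hyc]

lemma pv_newcell_bound (rows columns M x1 y1 x2 y2 : Int) (b : List (List Int))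
    (hS : pvShape rows columns b) (hB : pvBound M b)
    (h1 : 0 ≤ x1) (h2 : x1 < x2) (h3 : x2 < rows) (h4 : 0 ≤ y1) (h5 : y1 < y2) (h6 : y2 < columns)
    (i j : Int) (hi0 : 0 ≤ i) (hir : i < rows) (hj0 : 0 ≤ j) (hjc : j < columns) :
    pvNewCell x1 y1 x2 y2 b i j ≤ M := by
  unfold pvNewCell
  simp only [pv_bget_def]
  by_cases c0 : ¬(x1 ≤ i ∧ i ≤ x2 ∧ y1 ≤ j ∧ j ≤ y2 ∧ (i = x1 ∨ i = x2 ∨ j = y1 ∨ j = y2))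
  · rw [if_pos c0]
    exact pv_bound_bget rows columns M b hS hB i j hi0 hir hj0 hjc
  · rw [if_neg c0]
    by_cases c1 : i = x1 ∧ y1 < j
    · rw [if_pos c1]
      exact pv_bound_bget rows columns M b hS hB i (j - 1) hi0 hir (by omega) (by omega)
    · rw [if_neg c1]
      by_cases c2 : j = y2
      · rw [if_pos c2]
        exact pv_bound_bget rows columns M b hS hB (i - 1) j (by omega) (by omega) hj0 hjc
      · rw [if_neg c2]
        by_cases c3 : i = x2
        · rw [if_pos c3]
          exact pv_bound_bget rows columns M b hS hB i (j + 1) hi0 hir (by omega) (by omega)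
        · rw [if_neg c3]
          exact pv_bound_bget rows columns M b hS hB (i + 1) j (by omega) (by omega) hj0 hjc

lemma pv_ring_vals_le (rows columns M x1 y1 x2 y2 : Int) (b : List (List Int))
    (hS : pvShape rows columns b) (hB : pvBound M b)
    (h1 : 0 ≤ x1) (h2 : x1 < x2) (h3 : x2 < rows) (h4 : 0 ≤ y1) (h5 : y1 < y2) (h6 : y2 < columns) :
    ∀ v ∈ ((PySem.List.pyRange x1 x2 1).map (fun x => (x, y1))
          ++ (PySem.List.pyRange y1 y2 1).map (fun y => (x2, y))
          ++ (PySem.List.pyRange x2 x1 (-1)).map (fun x => (x, y2))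
          ++ (PySem.List.pyRange y2 y1 (-1)).map (fun y => (x1, y))).map
            (fun p => pvBGet b p.1 p.2), v ≤ M := by
  intro v hv
  rw [List.map_append, List.map_append, List.map_append] at hv
  rcases List.mem_append.1 hv with hv | hv
  · rcases List.mem_append.1 hv with hv | hv
    · rcases List.mem_append.1 hv with hv | hv
      · rw [List.map_map, List.mem_map] at hv
        obtain ⟨x, hx, hvx⟩ := hv
        rw [PySem.List.mem_pyRange_one] at hx
        rw [← hvx]
        exact pv_bound_bget rows columns M b hS hB x y1 (by omega) (by omega) (by omega) (by omega)
      · rw [List.map_map, List.mem_map] at hv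
        obtain ⟨y, hy, hvy⟩ := hv
        rw [PySem.List.mem_pyRange_one] at hy
        rw [← hvy]
        exact pv_bound_bget rows columns M b hS hB x2 y (by omega) (by omega) (by omega) (by omega)
    · rw [List.map_map, List.mem_map] at hv
      obtain ⟨x, hx, hvx⟩ := hv
      rw [PySem.List.mem_pyRange_neg_one] at hx
      rw [← hvx]
      exact pv_bound_bget rows columns M b hS hB x y2 (by omega) (by omega) (by omega) (by omega)
  · rw [List.map_map, List.mem_map] at hv
    obtain ⟨y, hy, hvy⟩ := hv
    rw [PySem.List.mem_pyRange_neg_one] at hy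
    rw [← hvy]
    exact pv_bound_bget rows columns M b hS hB x1 y (by omega) (by omega) (by omega) (by omega)

lemma pv_init_board (rows columns : Int) :
    pvShape rows columns ((PySem.List.pyRange 0 rows 1).map (fun i =>
      (PySem.List.pyRange 0 columns 1).map (fun j => i * columns + j + 1))) ∧
    pvBound (rows * columns) ((PySem.List.pyRange 0 rows 1).map (fun i =>
      (PySem.List.pyRange 0 columns 1).map (fun j => i * columns + j + 1))) := by
  refine ⟨⟨?_, ?_⟩, ?_⟩
  · rw [List.length_map, PySem.List.length_pyRange_one]; omega
  · intro r hr
    rw [List.mem_map] at hr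
    obtain ⟨i, _, hi⟩ := hr
    rw [← hi, List.length_map, PySem.List.length_pyRange_one]; omega
  · intro r hr v hv
    rw [List.mem_map] at hr
    obtain ⟨i, hi, hir⟩ := hr
    rw [PySem.List.mem_pyRange_one] at hi
    rw [← hir] at hv
    rw [List.mem_map] at hv
    obtain ⟨j, hj, hjv⟩ := hv
    rw [PySem.List.mem_pyRange_one] at hj
    rw [← hjv]
    have hi1 : i + 1 ≤ rows := by omega
    have hj1 : j + 1 ≤ columns := by omega
    nlinarith [hi.1, hj.1, hi.2, hj.2]

lemma pv_ok_elim (rows columns : Int) (q : List Int) (h : pvOkQuery rows columns q = true) :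
    ∃ a b c d : Int, q = [a, b, c, d] ∧ 1 ≤ a ∧ a < c ∧ c ≤ rows ∧ 1 ≤ b ∧ b < d ∧ d ≤ columns := by
  rcases q with _ | ⟨a, _ | ⟨b, _ | ⟨c, _ | ⟨d, _ | ⟨e, t⟩⟩⟩⟩⟩ <;>
    simp only [pvOkQuery, List.length_cons, List.length_nil, Bool.and_eq_true, beq_iff_eq,
      decide_eq_true_eq] at h
  · omega
  · omega
  · omega
  · omega
  · have e0 : PySem.List.pyGetD [a, b, c, d] 0 0 = a := rfl
    have e1 : PySem.List.pyGetD [a, b, c, d] 1 0 = b := rfl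
    have e2 : PySem.List.pyGetD [a, b, c, d] 2 0 = c := rfl
    have e3 : PySem.List.pyGetD [a, b, c, d] 3 0 = d := rfl
    rw [e0, e1, e2, e3] at h
    exact ⟨a, b, c, d, rfl, by omega, by omega, by omega, by omega, by omega, by omega⟩
  · omega

lemma pv_main (rows columns : Int) :
    ∀ (qs : List (List Int)) (b : List (List Int)) (acc : List Int),
      qs.all (pvOkQuery rows columns) = true →
      pvShape rows columns b → pvBound (rows * columns) b →
      (qs.foldl (fun (s : List (List Int) × List Int) query =>
          match query with
          | [a, b, c, d] =>
            let r := pvRotate a b c d s.1 rows columns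
            (r.1, s.2 ++ [r.2])
          | _ => s) (b, acc)).2
      = (qs.foldl (fun (s : List (List Int) × List Int) query =>
          if query.length = 4 then
            let x1 := PySem.List.pyGetD query 0 0 - 1
            let y1 := PySem.List.pyGetD query 1 0 - 1
            let x2 := PySem.List.pyGetD query 2 0 - 1
            let y2 := PySem.List.pyGetD query 3 0 - 1
              let ring := (PySem.List.pyRange x1 x2 1).map (fun x => (x, y1))
                ++ (PySem.List.pyRange y1 y2 1).map (fun y => (x2, y))
                ++ (PySem.List.pyRange x2 x1 (-1)).map (fun x => (x, y2))
                ++ (PySem.List.pyRange y2 y1 (-1)).map (fun y => (x1, y))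
              let m := (PySem.List.min? (ring.map
                (fun p => PySem.List.pyGetD (PySem.List.pyGetD s.1 p.1 []) p.2 0)) (fun v => v)).getD 0
              let board' := (PySem.List.pyRange 0 rows 1).map (fun i =>
                (PySem.List.pyRange 0 columns 1).map (fun j => pvNewCell x1 y1 x2 y2 s.1 i j))
              (board', s.2 ++ [m])
          else s) (b, acc)).2 := by
  intro qs
  induction qs with
  | nil => intro b acc _ _ _; simp
  | cons q qs ih =>
    intro b acc hall hS hB
    rw [List.all_cons, Bool.and_eq_true] at hall
    obtain ⟨a, bq, c, d, hq, hb1, hb2, hb3, hb4, hb5, hb6⟩ :=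
      pv_ok_elim rows columns q hall.1
    subst hq
    simp only [List.foldl_cons]
    have e0 : PySem.List.pyGetD [a, bq, c, d] 0 0 = a := rfl
    have e1 : PySem.List.pyGetD [a, bq, c, d] 1 0 = bq := rfl
    have e2 : PySem.List.pyGetD [a, bq, c, d] 2 0 = c := rfl
    have e3 : PySem.List.pyGetD [a, bq, c, d] 3 0 = d := rfl
    rw [e0, e1, e2, e3]
    obtain ⟨SR, PR, VR⟩ := pv_rotate_spec rows columns a bq c d b hS hb1 hb2 hb3 hb4 hb5 hb6
    obtain ⟨SB, PB⟩ := pv_alt_board rows columns (a - 1) (bq - 1) (c - 1) (d - 1) b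
    have hbd : (pvRotate a bq c d b rows columns).1
        = (PySem.List.pyRange 0 rows 1).map (fun i =>
            (PySem.List.pyRange 0 columns 1).map (fun j =>
              pvNewCell (a - 1) (bq - 1) (c - 1) (d - 1) b i j)) := by
      apply pv_eq_of_bget rows columns _ _ SR SB
      intro x y hx0 hxr hy0 hyc
      rw [PR x y hx0 hxr hy0 hyc, PB x y hx0 hxr hy0 hyc]
    have hm : (PySem.List.min? ((((PySem.List.pyRange (a - 1) (c - 1) 1).map (fun x => (x, bq - 1))
          ++ (PySem.List.pyRange (bq - 1) (d - 1) 1).map (fun y => (c - 1, y))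
          ++ (PySem.List.pyRange (c - 1) (a - 1) (-1)).map (fun x => (x, d - 1))
          ++ (PySem.List.pyRange (d - 1) (bq - 1) (-1)).map (fun y => (a - 1, y))).map
            (fun p => pvBGet b p.1 p.2))) (fun v => v)).getD 0
        = (pvRotate a bq c d b rows columns).2 := by
      rw [VR]
      apply pv_min_eq
      · apply List.ne_nil_of_length_pos
        simp only [List.length_map, List.length_append, PySem.List.length_pyRange_one]
        omega
      · exact pv_ring_vals_le rows columns (rows * columns) (a - 1) (bq - 1) (c - 1) (d - 1) b hS hB
          (by omega) (by omega) (by omega) (by omega) (by omega) (by omega)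
    have Bnew : pvBound (rows * columns) ((PySem.List.pyRange 0 rows 1).map (fun i =>
        (PySem.List.pyRange 0 columns 1).map (fun j =>
          pvNewCell (a - 1) (bq - 1) (c - 1) (d - 1) b i j))) := by
      intro r hr v hv
      rw [List.mem_map] at hr
      obtain ⟨i, hi, hir⟩ := hr
      rw [PySem.List.mem_pyRange_one] at hi
      rw [← hir] at hv
      rw [List.mem_map] at hv
      obtain ⟨j, hj, hjv⟩ := hv
      rw [PySem.List.mem_pyRange_one] at hj
      rw [← hjv]
      exact pv_newcell_bound rows columns (rows * columns) (a - 1) (bq - 1) (c - 1) (d - 1) b hS hB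
        (by omega) (by omega) (by omega) (by omega) (by omega) (by omega) i j
        (by omega) (by omega) (by omega) (by omega)
    simp only [pv_bget_def]
    rw [hm, ← hbd]
    exact ih _ _ hall.2 (hbd ▸ SB) (hbd ▸ Bnew)


-- ===== VERDICT (by name: the statement is the Claim_ definition above) =====
theorem solution_spec : Claim_equal_solution := by
  intro rows columns queries _ hPre
  unfold Spec_solution solution solution_alt
  exact pv_main rows columns queries _ [] hPre (pv_init_board rows columns).1 (pv_init_board rows columns).2
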